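-- pv_equiv track=rewrite | github.com/Gyeol0/Algorithm | 백준2502번.py | Tiger
-- ===== SOURCE A (Python) =====
-- def Tiger(D, K):
--     # A가 더해진 개수
--     A_count = 0
--     # B가 더해진 개수
--     B_count = 0
--     # dp
--     arr = []
--     arr.append('A')
--     arr.append('B')
--     for i in range(2, D):
--         arr.append(arr[i-1] + arr[i-2])
--     # A, B 카운트
--     for i in arr[-1]:
--         if i == 'A':
--             A_count += 1
--         else:
--             B_count += 1
--     # K = A  * A_count + B * B_count
--     # 1부터 시작하여 A 탐색, K에서 A개수 * A를 뺀 것이 B 개수로 나누어떨어지는 최솟값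
--     A = 1
--     while (K - A_count * A) % B_count:
--         A += 1
--     # B 계산
--     B = (K - A_count * A) // B_count
--
--     return A, B
-- ===== SOURCE B (Python) =====
-- def Tiger(D, K):
--     # O(D) integer Fibonacci DP instead of building exponential strings:
--     # (a, b) = (number of A's, number of B's) in the D-th term.
--     a, b = 0, 1
--     for _ in range(D - 2):
--         a, b = b, a + b
--     A = 1
--     while (K - a * A) % b:
--         A += 1
--     return A, (K - a * A) // b
-- ===== Notes on version B (the rewrite author's own statement) =====
-- stated objective: faster
-- what changed: B computes the two letter counts with an O(D) integer Fibonacci recurrence instead of materialising the exponentially long 'BABBA...' strings and counting their characters.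
import Mathlib
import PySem

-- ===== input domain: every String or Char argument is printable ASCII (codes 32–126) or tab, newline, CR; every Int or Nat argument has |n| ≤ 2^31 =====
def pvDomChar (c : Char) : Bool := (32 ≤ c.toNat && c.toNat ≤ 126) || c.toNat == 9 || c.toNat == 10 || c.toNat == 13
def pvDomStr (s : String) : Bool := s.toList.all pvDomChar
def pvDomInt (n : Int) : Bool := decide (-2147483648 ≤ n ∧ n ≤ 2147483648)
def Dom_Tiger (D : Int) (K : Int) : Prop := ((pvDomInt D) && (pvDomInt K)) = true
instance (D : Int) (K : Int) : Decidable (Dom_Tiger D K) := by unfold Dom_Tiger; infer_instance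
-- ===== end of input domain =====

-- B replaces A's exponential string DP (building the literal 'BABBA…' words) by an O(D)
-- integer Fibonacci DP for the two letter counts; the final linear search for A is unchanged.

-- ===== PORT A =====

-- the 'while (K - A_count*A) % B_count: A += 1' loop; fuel only makes it total
-- (with b = B_count ≥ 1 the search always succeeds within b steps, so the fuel is never exhausted)
def TigerSearch (a : Int) (b : Int) (K : Int) : Nat → Int → Int
  | 0, A => A
  | f + 1, A => if PySem.Int.mod (K - a * A) b ≠ 0 then TigerSearch a b K f (A + 1) else A

def Tiger (D : Int) (K : Int) : List Int :=
  -- arr = ['A','B']; for i in range(2, D): arr.append(arr[i-1] + arr[i-2])   (strings as List Char)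
  let arr : List (List Char) :=
    (PySem.List.pyRange 2 D 1).foldl
      (fun arr i => arr ++ [PySem.List.pyGetD arr (i - 1) [] ++ PySem.List.pyGetD arr (i - 2) []])
      [['A'], ['B']]
  -- for i in arr[-1]: if i == 'A': A_count += 1 else: B_count += 1
  let counts : Int × Int :=
    (PySem.List.pyGetD arr (-1) []).foldl
      (fun (c : Int × Int) ch => if ch = 'A' then (c.1 + 1, c.2) else (c.1, c.2 + 1)) (0, 0)
  let A := TigerSearch counts.1 counts.2 K counts.2.toNat 1
  [A, PySem.Int.floordiv (K - counts.1 * A) counts.2]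

-- ===== PORT B =====

-- for _ in range(D - 2): a, b = b, a + b   (starting from (0, 1))
def TigerFib : Nat → Int × Int
  | 0 => (0, 1)
  | n + 1 => let p := TigerFib n; (p.2, p.1 + p.2)

-- B's unbounded 'while (K - a*A) % b: A += 1'; fuel only makes it total (never exhausted, see above)
def TigerSearchB (a : Int) (b : Int) (K : Int) : Nat → Int → Int
  | 0, A => A
  | f + 1, A => if PySem.Int.mod (K - a * A) b ≠ 0 then TigerSearchB a b K f (A + 1) else A

def Tiger_alt (D : Int) (K : Int) : List Int :=
  let p := TigerFib (D - 2).toNat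
  let A := TigerSearchB p.1 p.2 K p.2.toNat 1
  [A, PySem.Int.floordiv (K - p.1 * A) p.2]

-- ===== PRECONDITION & SPEC =====
def Spec_Tiger (D : Int) (K : Int) (out : List Int) : Prop := out = Tiger_alt D K
instance (D : Int) (K : Int) (out : List Int) : Decidable (Spec_Tiger D K out) := by unfold Spec_Tiger; infer_instance

-- ===== CLAIM (what is proved, stated in full; the proofs are below) =====
def Claim_equal_Tiger : Prop := ∀ (D : Int) (K : Int), Dom_Tiger D K → Spec_Tiger D K (Tiger D K)

-- ===== LEMMAS AND PROOFS =====

-- the word A builds at index n: s 0 = "A", s 1 = "B", s (n+2) = s (n+1) + s n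
def TigerWord : Nat → List Char
  | 0 => ['A']
  | 1 => ['B']
  | n + 2 => TigerWord (n + 1) ++ TigerWord n

-- the two search loops are the same recursion
theorem searchB_eq_search (a b K : Int) : ∀ (f : Nat) (A : Int),
    TigerSearchB a b K f A = TigerSearch a b K f A := by
  intro f
  induction f with
  | zero => intro A; rfl
  | succ f ih =>
    intro A
    simp only [TigerSearch, TigerSearchB, ih]

-- A's build loop produces exactly [TigerWord 0, …, TigerWord (n+1)]
theorem tiger_build (n : Nat) :
    (PySem.List.pyRange 2 (2 + (n : Int)) 1).foldl
      (fun arr i => arr ++ [PySem.List.pyGetD arr (i - 1) [] ++ PySem.List.pyGetD arr (i - 2) []])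
      [['A'], ['B']] = (List.range (n + 2)).map TigerWord := by
  induction n with
  | zero =>
    simp [PySem.List.pyRange_one_eq_nil, List.range_succ]
    exact ⟨by simp [TigerWord], by simp [TigerWord]⟩
  | succ n ih =>
    have hr : PySem.List.pyRange 2 (2 + ((n : Int) + 1)) 1
        = PySem.List.pyRange 2 (2 + (n : Int)) 1 ++ [2 + (n : Int)] := by
      have := PySem.List.pyRange_one_succ_right (a := 2) (b := 2 + (n : Int)) (by omega)
      rw [← this]; ring_nf
    push_cast
    rw [hr, List.foldl_append, ih]
    have hlen : ((List.range (n + 2)).map TigerWord).length = n + 2 := by simp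
    have h1 : PySem.List.pyGetD ((List.range (n + 2)).map TigerWord) (2 + (n : Int) - 1) []
        = TigerWord (n + 1) := by
      have : (2 + (n : Int) - 1) = ((n + 1 : Nat) : Int) := by omega
      rw [this, PySem.List.pyGetD_natCast]
      simp [List.getD]
    have h2 : PySem.List.pyGetD ((List.range (n + 2)).map TigerWord) (2 + (n : Int) - 2) []
        = TigerWord n := by
      have : (2 + (n : Int) - 2) = ((n : Nat) : Int) := by omega
      rw [this, PySem.List.pyGetD_natCast]
      simp [List.getD]
    simp only [List.foldl_cons, List.foldl_nil, h1, h2]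
    rw [List.range_succ (n := n + 2)]
    simp [TigerWord]

-- letter counts of the words are Fibonacci numbers
theorem tiger_word_count : ∀ n : Nat,
    ((TigerWord (n + 1)).count 'A' = Nat.fib n ∧ (TigerWord n).count 'B' = Nat.fib n)
    ∧ ((TigerWord (n + 2)).count 'A' = Nat.fib (n + 1) ∧ (TigerWord (n + 1)).count 'B' = Nat.fib (n + 1)) := by
  intro n
  induction n with
  | zero => refine ⟨⟨?_, ?_⟩, ?_, ?_⟩ <;> decide
  | succ n ih =>
    refine ⟨ih.2, ?_, ?_⟩
    · show (TigerWord (n + 2) ++ TigerWord (n + 1)).count 'A' = Nat.fib (n + 2)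
      rw [List.count_append, ih.1.1, ih.2.1, Nat.fib_add_two, Nat.add_comm]
    · show (TigerWord (n + 1) ++ TigerWord n).count 'B' = Nat.fib (n + 2)
      rw [List.count_append, ih.1.2, ih.2.2, Nat.fib_add_two, Nat.add_comm]

-- A's counting loop, from an arbitrary start
theorem count_fold (l : List Char) : ∀ (x y : Int),
    l.foldl (fun (c : Int × Int) ch => if ch = 'A' then (c.1 + 1, c.2) else (c.1, c.2 + 1)) (x, y)
      = (x + (l.count 'A' : Int), y + ((l.length - l.count 'A' : Nat) : Int)) := by
  induction l with
  | nil => intro x y; simp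
  | cons c l ih =>
    intro x y
    have hle : l.count 'A' ≤ l.length := List.count_le_length
    by_cases hc : c = 'A' <;> simp [hc, ih, Prod.ext_iff] <;> omega

-- B's DP computes the same Fibonacci pair
theorem tiger_fib_eq (n : Nat) : TigerFib n = ((Nat.fib n : Int), (Nat.fib (n + 1) : Int)) := by
  induction n with
  | zero => rfl
  | succ n ih =>
    simp only [TigerFib, ih, Nat.fib_add_two, Prod.ext_iff]
    push_cast
    exact ⟨trivial, by ring⟩

theorem tiger_word_length (n : Nat) :
    (TigerWord n).length = (TigerWord n).count 'A' + (TigerWord n).count 'B' := by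
  induction n using TigerWord.induct with
  | case1 => decide
  | case2 => decide
  | case3 n ih1 ih2 =>
    simp only [TigerWord, List.length_append, List.count_append, ih1, ih2]
    omega

-- ===== VERDICT (by name: the statement is the Claim_ definition above) =====
theorem Tiger_spec : Claim_equal_Tiger := by
  intro D K _
  show Tiger D K = Tiger_alt D K
  have harr : (PySem.List.pyRange 2 D 1).foldl
      (fun arr i => arr ++ [PySem.List.pyGetD arr (i - 1) [] ++ PySem.List.pyGetD arr (i - 2) []])
      [['A'], ['B']] = (List.range ((D - 2).toNat + 2)).map TigerWord := by
    by_cases hD : 2 ≤ D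
    · have hDn : D = 2 + (((D - 2).toNat : Nat) : Int) := by omega
      rw [hDn]
      have h2 : ((2 + (((D - 2).toNat : Nat) : Int)) - 2).toNat = (D - 2).toNat := by omega
      rw [h2]
      exact tiger_build (D - 2).toNat
    · have hz : (D - 2).toNat = 0 := by omega
      rw [PySem.List.pyRange_one_eq_nil (by omega), hz]
      simp [List.range_succ]
      exact ⟨by simp [TigerWord], by simp [TigerWord]⟩
  simp only [Tiger, Tiger_alt, harr]
  generalize (D - 2).toNat = n
  have hlast : PySem.List.pyGetD ((List.range (n + 2)).map TigerWord) (-1) []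
      = TigerWord (n + 1) := by
    rw [PySem.List.pyGetD_neg_one ((List.range (n + 2)).map TigerWord) [] (by simp),
      List.getLast_eq_getElem]
    simp
  have hA : (TigerWord (n + 1)).count 'A' = Nat.fib n := (tiger_word_count n).1.1
  have hB : (TigerWord (n + 1)).count 'B' = Nat.fib (n + 1) := (tiger_word_count n).2.2
  have hlen : (TigerWord (n + 1)).length - (TigerWord (n + 1)).count 'A' = Nat.fib (n + 1) := by
    rw [tiger_word_length (n + 1), hA, hB]; omega
  have hlen2 : (TigerWord (n + 1)).length - Nat.fib n = Nat.fib (n + 1) := by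
    rw [← hA]; exact hlen
  rw [hlast, count_fold, tiger_fib_eq, hA, hlen2]
  simp [searchB_eq_search]
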